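-- pv_equiv track=rewrite | github.com/nisarifdah/tucil2kripto | lsfr.py | reduceKey
-- ===== SOURCE A (Python) =====
-- def reduceKey(k):
--     key = list(k)
--     key_length = len(key)
--     output = []
--     for i in range(32):
--         groupKey = key[i::32]
--         output.append(xorKey(groupKey, len(groupKey)))
--     return output
--
-- def xorKey(arr, n):
--     xor = 0
--     for i in range(n):
--         xor ^= ord(arr[i])
--     return xor
-- ===== SOURCE B (Python) =====
-- def reduceKey(k):
--     # Single forward pass scattering each character into its bucket,
--     # instead of 32 strided gather passes.
--     output = [0] * 32
--     i = 0
--     for ch in k: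
--         output[i] ^= ord(ch)
--         i = (i + 1) % 32
--     return output
-- ===== Notes on version B (the rewrite author's own statement) =====
-- stated objective: simpler
-- what changed: Replaces 32 strided slice-and-gather passes (with the xorKey helper) by one flat forward loop that scatters each character's ord into a 32-entry bucket array via a rotating index.
import Mathlib
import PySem

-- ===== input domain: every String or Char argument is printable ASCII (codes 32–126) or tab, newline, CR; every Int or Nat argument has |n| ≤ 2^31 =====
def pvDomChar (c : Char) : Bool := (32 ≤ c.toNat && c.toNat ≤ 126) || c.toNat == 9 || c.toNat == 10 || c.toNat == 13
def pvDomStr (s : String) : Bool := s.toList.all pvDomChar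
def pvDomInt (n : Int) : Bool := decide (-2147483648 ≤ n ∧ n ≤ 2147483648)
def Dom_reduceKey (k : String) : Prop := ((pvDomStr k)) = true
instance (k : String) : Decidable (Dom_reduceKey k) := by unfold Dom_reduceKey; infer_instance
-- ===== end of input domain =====

-- B replaces A's 32 strided gather passes (helper xorKey per slice) by one flat scatter loop with a rotating bucket index (simpler decomposition; same O(n)).

-- ===== PORT A =====
-- xorKey(arr, n): xor of ord(arr[i]) for i in range(n); always called with n = len(arr),
-- so arr[i] is in range and getD is exact there.
def xorKey (arr : List Char) (n : Nat) : Int :=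
  (List.range n).foldl (fun x i => PySem.Int.bxor x ((arr.getD i 'a').toNat : Int)) 0

-- hand port of the strided slice key[i::32] (PySem.List.slice has no step): take the head, then every 32nd element
def strideTail (xs : List Char) : List Char :=
  match xs with
  | [] => []
  | x :: r => x :: strideTail (r.drop 31)
termination_by xs.length
decreasing_by simp only [List.length_drop, List.length_cons]; omega

def reduceKey (k : String) : List Int :=
  let key := k.toList
  (List.range 32).foldl
    (fun output i =>
      let groupKey := strideTail (key.drop i)
      output ++ [xorKey groupKey groupKey.length]) []

-- ===== PORT B =====
-- the loop body: output[i] ^= ord(ch); i = (i + 1) % 32  (i stays in 0..31, so indexing is in range and set/getD are exact)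
def altLoop : List Char → Nat → List Int → List Int
  | [], _, output => output
  | c :: cs, i, output =>
      altLoop cs ((i + 1) % 32) (output.set i (PySem.Int.bxor (output.getD i 0) (c.toNat : Int)))

def reduceKey_alt (k : String) : List Int :=
  altLoop k.toList 0 (List.replicate 32 0)

-- ===== PRECONDITION & SPEC =====
def Spec_reduceKey (k : String) (out : List Int) : Prop := out = reduceKey_alt k
instance (k : String) (out : List Int) : Decidable (Spec_reduceKey k out) := by unfold Spec_reduceKey; infer_instance

-- ===== CLAIM (what is proved, stated in full; the proofs are below) =====
def Claim_equal_reduceKey : Prop := ∀ (k : String), Dom_reduceKey k → Spec_reduceKey k (reduceKey k)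

-- ===== LEMMAS AND PROOFS =====

lemma strideTail_nil : strideTail [] = [] := by rw [strideTail.eq_def]

lemma strideTail_cons (x : Char) (r : List Char) :
    strideTail (x :: r) = x :: strideTail (r.drop 31) := by rw [strideTail.eq_def]

-- Nat list viewed as an Int list (the bucket array's values are the casts of Nat xors)
def castL (L : List Nat) : List Int := L.map (fun n : Nat => (n : Int))

-- xor of the chars of a list, in Nat
def xorN (L : List Char) : Nat := L.foldl (fun a c => a ^^^ c.toNat) 0

-- xor of the chars of cs that land in bucket j when the rotating index starts at i
def specN : List Char → Nat → Nat → Nat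
  | [], _, _ => 0
  | c :: cs, j, i =>
      if i = j then c.toNat ^^^ specN cs j ((i + 1) % 32) else specN cs j ((i + 1) % 32)

lemma foldl_xor_shift (L : List Char) (a : Nat) :
    L.foldl (fun x c => x ^^^ c.toNat) a = a ^^^ xorN L := by
  induction L generalizing a with
  | nil => simp [xorN]
  | cons c cs ih =>
      simp only [List.foldl_cons, xorN] at *
      rw [ih (a ^^^ c.toNat), ih (0 ^^^ c.toNat)]
      simp [Nat.zero_xor, Nat.xor_assoc]

lemma xorN_cons (c : Char) (L : List Char) : xorN (c :: L) = c.toNat ^^^ xorN L := by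
  simp only [xorN, List.foldl_cons, Nat.zero_xor]
  exact foldl_xor_shift L c.toNat

lemma xorKey_eq (g : List Char) : xorKey g g.length = (xorN g : Int) := by
  induction g using List.reverseRecOn with
  | nil => simp [xorKey, xorN]
  | append_singleton g c ih =>
      simp only [xorKey, List.length_append, List.length_cons, List.length_nil,
        List.range_succ, List.foldl_append, List.foldl_cons, List.foldl_nil] at *
      have h1 :
          (List.range g.length).foldl (fun x i => PySem.Int.bxor x (((g ++ [c]).getD i 'a').toNat : Int)) 0
          = (List.range g.length).foldl (fun x i => PySem.Int.bxor x ((g.getD i 'a').toNat : Int)) 0 := by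
        apply List.foldl_ext
        intro x i hi
        have : i < g.length := List.mem_range.mp hi
        simp [List.getD, List.getElem?_append_left this]
      rw [h1, ih]
      have h2 : (g ++ [c]).getD g.length 'a' = c := by simp [List.getD]
      have h3 : xorN (g ++ [c]) = xorN g ^^^ c.toNat := by
        simp only [xorN, List.foldl_append, List.foldl_cons, List.foldl_nil]
      rw [h2, h3]
      simp

-- specN is exactly the xor of the strided slice starting (j - i) mod 32 further on
lemma specN_eq_stride (cs : List Char) (j : Nat) (hj : j < 32) : ∀ (i : Nat), i < 32 →
    specN cs j i = xorN (strideTail (cs.drop ((j + 32 - i) % 32))) := by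
  induction cs with
  | nil => intro i hi; simp [specN, strideTail_nil, xorN]
  | cons c cs ih =>
      intro i hi
      by_cases h : i = j
      · subst h
        have hd : (i + 32 - i) % 32 = 0 := by omega
        rw [specN, if_pos rfl, hd, List.drop_zero, strideTail_cons, xorN_cons]
        have h31 : (i + 32 - (i + 1) % 32) % 32 = 31 := by omega
        rw [ih ((i + 1) % 32) (Nat.mod_lt _ (by omega)), h31]
      · have hd : 1 ≤ (j + 32 - i) % 32 ∧ (j + 32 - i) % 32 ≤ 31 := by omega
        have hdrop : (c :: cs).drop ((j + 32 - i) % 32) = cs.drop ((j + 32 - i) % 32 - 1) := by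
          obtain ⟨h1, _⟩ := hd
          conv_lhs => rw [show (j + 32 - i) % 32 = ((j + 32 - i) % 32 - 1) + 1 by omega]
          rw [List.drop_succ_cons]
        have hd' : (j + 32 - (i + 1) % 32) % 32 = (j + 32 - i) % 32 - 1 := by omega
        rw [specN, if_neg h, hdrop, ih ((i + 1) % 32) (Nat.mod_lt _ (by omega)), hd']

-- A's fold produces the 32 strided xors
lemma reduceKey_eq_map (k : String) :
    reduceKey k = (List.range 32).map (fun i => (xorN (strideTail (k.toList.drop i)) : Int)) := by
  unfold reduceKey
  rw [PySem.List.foldl_append_singleton_eq_map]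
  exact List.map_congr_left (fun i _ => xorKey_eq _)

-- B's loop invariant: the bucket array accumulates specN
lemma altLoop_eq (cs : List Char) : ∀ (i : Nat) (outN : List Nat), i < 32 → outN.length = 32 →
    altLoop cs i (castL outN)
      = (List.range 32).map (fun j => ((outN.getD j 0 ^^^ specN cs j i : Nat) : Int)) := by
  induction cs with
  | nil =>
      intro i outN hi hlen
      simp only [altLoop, specN, Nat.xor_zero, castL]
      apply List.ext_getElem
      · simp [hlen]
      · intro j h1 h2
        simp only [List.getElem_map, List.getElem_range]
        rw [List.getD_eq_getElem _ _ (by simp at h1; omega)]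
  | cons c cs ih =>
      intro i outN hi hlen
      have hilen : i < outN.length := by omega
      have hget : (castL outN).getD i 0 = ((outN.getD i 0 : Nat) : Int) := by
        rw [castL, List.getD_eq_getElem _ _ (by simp; omega), List.getD_eq_getElem _ _ hilen,
          List.getElem_map]
      simp only [altLoop]
      rw [hget, show PySem.Int.bxor ((outN.getD i 0 : Nat) : Int) (c.toNat : Int)
            = ((outN.getD i 0 ^^^ c.toNat : Nat) : Int) from by simp,
        castL, ← List.map_set, ← castL, ih ((i + 1) % 32) _ (Nat.mod_lt _ (by omega)) (by simp [hlen])]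
      apply List.map_congr_left
      intro j hj
      have hj32 : j < 32 := List.mem_range.mp hj
      congr 1
      by_cases h : i = j
      · subst h
        rw [List.getD_eq_getElem _ _ (by simp; omega), List.getElem_set_self,
          List.getD_eq_getElem _ _ hilen, specN, if_pos rfl, Nat.xor_assoc]
      · have hs : (outN.set i (outN.getD i 0 ^^^ c.toNat)).getD j 0 = outN.getD j 0 := by
          simp [List.getD, List.getElem?_set_ne h]
        rw [hs, specN, if_neg h]

-- ===== VERDICT (by name: the statement is the Claim_ definition above) =====
theorem reduceKey_spec : Claim_equal_reduceKey := by
  intro k _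
  unfold Spec_reduceKey reduceKey_alt
  have hrep : (List.replicate 32 (0 : Int)) = castL (List.replicate 32 (0 : Nat)) := by
    rw [castL, List.map_replicate]
    simp
  rw [hrep, altLoop_eq k.toList 0 _ (by omega) (by simp), reduceKey_eq_map]
  apply List.map_congr_left
  intro j hj
  have hj32 : j < 32 := List.mem_range.mp hj
  rw [List.getD_eq_getElem _ _ (by simp; omega), List.getElem_replicate, Nat.zero_xor,
    specN_eq_stride _ _ hj32 0 (by omega), show (j + 32 - 0) % 32 = j from by omega]
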